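-- pv_equiv track=rewrite | github.com/NamiLiy/Helios_scalable_QEC | build_scripts/partitionScheme.py | getEdgeCount
-- ===== SOURCE A (Python) =====
-- def getEdgeCount(grid, p):
--     offset=[(0,1),(1,0),(0,-1),(-1,0)]
--     ret = 0
--     for j in range(len(grid)):
--         for i in range(len(grid[0])):
--             if(grid[j][i] == p):
--                 for off in offset:
--                     if j+off[1] >= 0 and j+off[1]<len(grid) and  i+off[0]>=0 and i+off[0]<len(grid[0]):
--                         if(grid[j+off[1]][i+off[0]] != grid[j][i]):
--                             ret = ret + 1
--     return ret
-- ===== SOURCE B (Python) =====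
-- def getEdgeCount(grid, p):
--     ret = 0
--     h = len(grid)
--     w = len(grid[0]) if grid else 0
--     for j in range(h):
--         for i in range(w):
--             c = grid[j][i] == p
--             if i + 1 < w and (grid[j][i + 1] == p) != c:
--                 ret += 1
--             if j + 1 < h and (grid[j + 1][i] == p) != c:
--                 ret += 1
--     return ret
-- ===== Notes on version B (the rewrite author's own statement) =====
-- stated objective: alternative
-- what changed: Instead of probing all four offsets from every cell equal to p, B scans each cell once and counts the right and down adjacent pairs in which exactly one cell equals p, so each boundary edge is counted once from one fixed side.
import Mathlib
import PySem

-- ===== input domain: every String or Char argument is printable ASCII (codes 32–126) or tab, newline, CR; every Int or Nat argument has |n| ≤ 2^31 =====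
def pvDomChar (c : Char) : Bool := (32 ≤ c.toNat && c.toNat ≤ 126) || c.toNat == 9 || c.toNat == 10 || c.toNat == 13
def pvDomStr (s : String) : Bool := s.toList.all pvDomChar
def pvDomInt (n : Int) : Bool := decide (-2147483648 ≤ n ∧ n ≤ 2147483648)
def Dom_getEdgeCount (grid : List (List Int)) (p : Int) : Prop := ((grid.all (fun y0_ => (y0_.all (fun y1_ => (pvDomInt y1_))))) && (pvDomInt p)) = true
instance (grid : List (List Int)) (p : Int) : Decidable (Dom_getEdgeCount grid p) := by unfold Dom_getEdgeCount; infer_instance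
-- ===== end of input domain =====

-- B counts each boundary edge once by scanning every cell and testing only its right and down
-- neighbours for "exactly one side equals p", instead of A's 4-offset probe from every p-cell
-- (objective: alternative decomposition, same asymptotic cost).


-- ===== PORT A =====
-- range(len(…)) → PySem.List.pyRange; grid[j][i] (in-range nonnegative indices) → PySem.List.pyGetD
-- (Python raises exactly where a row is shorter than len(grid[0]); those inputs are excluded by Pre_getEdgeCount).
def getEdgeCount (grid : List (List Int)) (p : Int) : Int :=
  let offset : List (Int × Int) := [(0,1),(1,0),(0,-1),(-1,0)]
  (PySem.List.pyRange 0 (grid.length : Int) 1).foldl (fun ret j =>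
    (PySem.List.pyRange 0 ((PySem.List.pyGetD grid 0 []).length : Int) 1).foldl (fun ret i =>
      if PySem.List.pyGetD (PySem.List.pyGetD grid j []) i 0 = p then
        offset.foldl (fun ret off =>
          if 0 ≤ j + off.2 ∧ j + off.2 < (grid.length : Int) ∧
             0 ≤ i + off.1 ∧ i + off.1 < ((PySem.List.pyGetD grid 0 []).length : Int) then
            if PySem.List.pyGetD (PySem.List.pyGetD grid (j + off.2) []) (i + off.1) 0 ≠
               PySem.List.pyGetD (PySem.List.pyGetD grid j []) i 0 then
              ret + 1
            else ret
          else ret) ret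
      else ret) ret) 0

-- ===== PORT B =====
def getEdgeCount_alt (grid : List (List Int)) (p : Int) : Int :=
  let h : Int := grid.length
  let w : Int := if grid.isEmpty then 0 else ((PySem.List.pyGetD grid 0 []).length : Int)
  (PySem.List.pyRange 0 h 1).foldl (fun ret j =>
    (PySem.List.pyRange 0 w 1).foldl (fun ret i =>
      let c : Bool := decide (PySem.List.pyGetD (PySem.List.pyGetD grid j []) i 0 = p)
      let ret := if i + 1 < w ∧ (decide (PySem.List.pyGetD (PySem.List.pyGetD grid j []) (i + 1) 0 = p) ≠ c)
                 then ret + 1 else ret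
      if j + 1 < h ∧ (decide (PySem.List.pyGetD (PySem.List.pyGetD grid (j + 1) []) i 0 = p) ≠ c)
      then ret + 1 else ret) ret) 0

-- ===== PRECONDITION & SPEC =====
-- Python A indexes every row up to len(grid[0]) and raises IndexError on any shorter row;
-- Pre_ excludes exactly those non-rectangular grids (rows longer than row 0 are fine, A ignores
-- their tail).  On the empty grid A returns 0 without touching grid[0].
def Pre_getEdgeCount (grid : List (List Int)) (p : Int) : Prop :=
  ∀ row ∈ grid, (grid.headD []).length ≤ row.length
instance (grid : List (List Int)) (p : Int) : Decidable (Pre_getEdgeCount grid p) := by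
  unfold Pre_getEdgeCount; infer_instance
def pvWitness_getEdgeCount : List (List Int) × Int := ([[1, 0], [0, 1]], 1)

def Spec_getEdgeCount (grid : List (List Int)) (p : Int) (out : Int) : Prop := out = getEdgeCount_alt grid p
instance (grid : List (List Int)) (p : Int) (out : Int) : Decidable (Spec_getEdgeCount grid p out) := by unfold Spec_getEdgeCount; infer_instance

-- ===== CLAIM (what is proved, stated in full; the proofs are below) =====
def Claim_equal_getEdgeCount : Prop := ∀ (grid : List (List Int)) (p : Int), Dom_getEdgeCount grid p → Pre_getEdgeCount grid p → Spec_getEdgeCount grid p (getEdgeCount grid p)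

-- ===== LEMMAS AND PROOFS =====

-- cell value read with defaults (the ports only read in-range cells on Pre_-inputs)
def gg (grid : List (List Int)) (j i : Nat) : Int := (grid.getD j []).getD i 0

-- the three kinds of 0/1 terms, over an abstract line q : Nat → Int
def eR (q : Nat → Int) (p : Int) (w i : Nat) : Int :=
  if i + 1 < w ∧ q i = p ∧ ¬ q (i + 1) = p then 1 else 0
def eL (q : Nat → Int) (p : Int) (i : Nat) : Int :=
  if 1 ≤ i ∧ q i = p ∧ ¬ q (i - 1) = p then 1 else 0
def eB (q : Nat → Int) (p : Int) (w i : Nat) : Int :=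
  if i + 1 < w ∧ (decide (q (i + 1) = p) ≠ decide (q i = p)) then 1 else 0

lemma add_if_one (c : Prop) [Decidable c] (r : Int) :
    (if c then r + 1 else r) = r + (if c then 1 else 0) := by split_ifs <;> ring

lemma if_add_zero (c : Prop) [Decidable c] (r t : Int) :
    (if c then r + t else r) = r + (if c then t else 0) := by split_ifs <;> ring

-- a loop 'for i in range(n): acc += f(i)' is a Finset.range sum
lemma foldl_pyRange_add (n : Nat) (body : Int → Int → Int) (f : Nat → Int) (a : Int)
    (hb : ∀ acc (i : Nat), i < n → body acc (i : Int) = acc + f i) :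
    (PySem.List.pyRange 0 (n : Int) 1).foldl body a = a + ∑ i ∈ Finset.range n, f i := by
  induction n generalizing a with
  | zero => simp [PySem.List.pyRange_one_eq_nil]
  | succ m ih =>
      have hsplit : PySem.List.pyRange 0 ((m + 1 : Nat) : Int) 1
          = PySem.List.pyRange 0 (m : Int) 1 ++ [(m : Int)] := by
        have : ((m + 1 : Nat) : Int) = (m : Int) + 1 := by push_cast; ring
        rw [this, PySem.List.pyRange_one_succ_right (by positivity)]
      rw [hsplit, List.foldl_append, ih a (fun acc i hi => hb acc i (by omega))]
      simp only [List.foldl]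
      rw [hb _ m (by omega), Finset.sum_range_succ]
      ring

lemma sum_shift (n : Nat) (f : Nat → Int) (h0 : f 0 = 0) :
    ∑ i ∈ Finset.range n, f i = ∑ i ∈ Finset.range n, (if i + 1 < n then f (i + 1) else 0) := by
  cases n with
  | zero => simp
  | succ v =>
      rw [Finset.sum_range_succ', Finset.sum_range_succ, h0]
      have h1 : (if v + 1 < v + 1 then f (v + 1) else 0) = 0 := by simp
      rw [h1, add_zero, add_zero]
      exact Finset.sum_congr rfl (fun i hi => by
        rw [Finset.mem_range] at hi
        rw [if_pos (by omega)])

lemma xor_split (c a b : Prop) [Decidable c] [Decidable a] [Decidable b] :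
    (if c ∧ (decide b ≠ decide a) then (1 : Int) else 0) =
      (if c ∧ a ∧ ¬ b then 1 else 0) + (if c ∧ b ∧ ¬ a then 1 else 0) := by
  by_cases ha : a <;> by_cases hb : b <;> by_cases hc : c <;> simp [ha, hb, hc]

-- 1-D core: right-looking + left-looking probes from p-cells = "exactly one of a right pair is p"
lemma row_lemma (q : Nat → Int) (p : Int) (w : Nat) :
    ∑ i ∈ Finset.range w, (eR q p w i + eL q p i) = ∑ i ∈ Finset.range w, eB q p w i := by
  rw [Finset.sum_add_distrib]
  have hL : ∑ i ∈ Finset.range w, eL q p i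
      = ∑ i ∈ Finset.range w, (if i + 1 < w ∧ q (i + 1) = p ∧ ¬ q i = p then (1 : Int) else 0) := by
    rw [sum_shift w (eL q p) (by simp [eL])]
    exact Finset.sum_congr rfl (fun i _ => by
      by_cases h : i + 1 < w
      · simp only [if_pos h, eL, Nat.add_sub_cancel]
        split_ifs with h1 h2 <;> first | rfl | (exfalso; omega) | (exfalso; tauto)
      · simp [h])
  rw [hL, ← Finset.sum_add_distrib]
  exact Finset.sum_congr rfl (fun i _ => by
    simp only [eB, eR]
    rw [xor_split (i + 1 < w) (q i = p) (q (i + 1) = p)])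

-- 2-D master identity, for an arbitrary cell function g
lemma master (g : Nat → Nat → Int) (p : Int) (h w : Nat) :
    ∑ j ∈ Finset.range h, ∑ i ∈ Finset.range w,
        (eR (fun y => g y i) p h j + eR (g j) p w i + eL (fun y => g y i) p j + eL (g j) p i)
      = ∑ j ∈ Finset.range h, ∑ i ∈ Finset.range w,
        (eB (g j) p w i + eB (fun y => g y i) p h j) := by
  have split1 : ∀ j, ∑ i ∈ Finset.range w,
      (eR (fun y => g y i) p h j + eR (g j) p w i + eL (fun y => g y i) p j + eL (g j) p i)
      = (∑ i ∈ Finset.range w, (eR (g j) p w i + eL (g j) p i))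
        + ∑ i ∈ Finset.range w, (eR (fun y => g y i) p h j + eL (fun y => g y i) p j) := by
    intro j; rw [← Finset.sum_add_distrib]; exact Finset.sum_congr rfl (fun i _ => by ring)
  have split2 : ∀ j, ∑ i ∈ Finset.range w, (eB (g j) p w i + eB (fun y => g y i) p h j)
      = (∑ i ∈ Finset.range w, eB (g j) p w i)
        + ∑ i ∈ Finset.range w, eB (fun y => g y i) p h j := by
    intro j; rw [Finset.sum_add_distrib]
  simp only [split1, split2]
  rw [Finset.sum_add_distrib, Finset.sum_add_distrib]
  congr 1
  · exact Finset.sum_congr rfl (fun j _ => row_lemma (g j) p w)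
  · rw [Finset.sum_comm, Finset.sum_comm (s := Finset.range h)]
    exact Finset.sum_congr rfl (fun i _ => row_lemma (fun y => g y i) p h)

-- the width both programs use
def W (grid : List (List Int)) : Nat := (grid.headD []).length

lemma pyW (grid : List (List Int)) : (PySem.List.pyGetD grid 0 []).length = W grid := by
  rw [PySem.List.pyGetD_zero, W]
  cases grid <;> rfl

lemma cell_cast (grid : List (List Int)) (j i : Nat) :
    PySem.List.pyGetD (PySem.List.pyGetD grid (j : Int) []) (i : Int) 0 = gg grid j i := by
  simp [PySem.List.pyGetD_natCast, gg]

-- A's port as a clean double sum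
lemma A_eq (grid : List (List Int)) (p : Int) :
    getEdgeCount grid p = ∑ j ∈ Finset.range grid.length, ∑ i ∈ Finset.range (W grid),
      (eR (fun y => gg grid y i) p grid.length j + eR (gg grid j) p (W grid) i
        + eL (fun y => gg grid y i) p j + eL (gg grid j) p i) := by
  simp only [getEdgeCount, pyW]
  rw [foldl_pyRange_add grid.length _
    (fun j => ∑ i ∈ Finset.range (W grid),
      (eR (fun y => gg grid y i) p grid.length j + eR (gg grid j) p (W grid) i
        + eL (fun y => gg grid y i) p j + eL (gg grid j) p i)) 0 ?_]
  · rw [zero_add]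
  intro acc j hj
  rw [foldl_pyRange_add (W grid) _
    (fun i => eR (fun y => gg grid y i) p grid.length j + eR (gg grid j) p (W grid) i
        + eL (fun y => gg grid y i) p j + eL (gg grid j) p i) acc ?_]
  intro acc2 i hi
  simp only [List.foldl, if_add_zero, cell_cast]
  by_cases hc : gg grid j i = p
  · rw [if_pos hc]
    have cj1 : ((j : Int) + 1) = ((j + 1 : Nat) : Int) := by push_cast; ring
    have ci1 : ((i : Int) + 1) = ((i + 1 : Nat) : Int) := by push_cast; ring
    have t1 : (if 0 ≤ (j : Int) + 1 ∧ (j : Int) + 1 < (grid.length : Int) ∧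
          0 ≤ (i : Int) + 0 ∧ (i : Int) + 0 < ((W grid : Nat) : Int) then
          (if PySem.List.pyGetD (PySem.List.pyGetD grid ((j : Int) + 1) []) ((i : Int) + 0) 0 ≠
              gg grid j i then (1 : Int) else 0) else 0)
        = eR (fun y => gg grid y i) p grid.length j := by
      rw [eR]
      by_cases hg : j + 1 < grid.length
      · rw [if_pos (by refine ⟨by omega, by exact_mod_cast hg, by omega, by exact_mod_cast hi⟩)]
        have e0 : ((i : Int) + 0) = ((i : Nat) : Int) := by ring
        rw [cj1, e0, cell_cast, hc]
        split_ifs with h1 h2 <;> first | rfl | (exfalso; tauto) | (exfalso; omega)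
      · rw [if_neg (by intro hcon; exact hg (by exact_mod_cast hcon.2.1)), if_neg (by omega)]
    have t2 : (if 0 ≤ (j : Int) + 0 ∧ (j : Int) + 0 < (grid.length : Int) ∧
          0 ≤ (i : Int) + 1 ∧ (i : Int) + 1 < ((W grid : Nat) : Int) then
          (if PySem.List.pyGetD (PySem.List.pyGetD grid ((j : Int) + 0) []) ((i : Int) + 1) 0 ≠
              gg grid j i then (1 : Int) else 0) else 0)
        = eR (gg grid j) p (W grid) i := by
      rw [eR]
      by_cases hg : i + 1 < W grid
      · rw [if_pos (by refine ⟨by omega, by exact_mod_cast hj, by omega, by exact_mod_cast hg⟩)]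
        have e0 : ((j : Int) + 0) = ((j : Nat) : Int) := by ring
        rw [ci1, e0, cell_cast, hc]
        split_ifs with h1 h2 <;> first | rfl | (exfalso; tauto) | (exfalso; omega)
      · rw [if_neg (by intro hcon; exact hg (by exact_mod_cast hcon.2.2.2)), if_neg (by omega)]
    have t3 : (if 0 ≤ (j : Int) + (-1) ∧ (j : Int) + (-1) < (grid.length : Int) ∧
          0 ≤ (i : Int) + 0 ∧ (i : Int) + 0 < ((W grid : Nat) : Int) then
          (if PySem.List.pyGetD (PySem.List.pyGetD grid ((j : Int) + (-1)) []) ((i : Int) + 0) 0 ≠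
              gg grid j i then (1 : Int) else 0) else 0)
        = eL (fun y => gg grid y i) p j := by
      rw [eL]
      by_cases hg : 1 ≤ j
      · rw [if_pos (by refine ⟨by omega, by omega, by omega, by exact_mod_cast hi⟩)]
        have cjm : ((j : Int) + (-1)) = ((j - 1 : Nat) : Int) := by omega
        have e0 : ((i : Int) + 0) = ((i : Nat) : Int) := by ring
        rw [cjm, e0, cell_cast, hc]
        split_ifs with h1 h2 <;> first | rfl | (exfalso; tauto) | (exfalso; omega)
      · rw [if_neg (by intro hcon; omega), if_neg (by omega)]
    have t4 : (if 0 ≤ (j : Int) + 0 ∧ (j : Int) + 0 < (grid.length : Int) ∧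
          0 ≤ (i : Int) + (-1) ∧ (i : Int) + (-1) < ((W grid : Nat) : Int) then
          (if PySem.List.pyGetD (PySem.List.pyGetD grid ((j : Int) + 0) []) ((i : Int) + (-1)) 0 ≠
              gg grid j i then (1 : Int) else 0) else 0)
        = eL (gg grid j) p i := by
      rw [eL]
      by_cases hg : 1 ≤ i
      · rw [if_pos (by refine ⟨by omega, by exact_mod_cast hj, by omega, by omega⟩)]
        have cim : ((i : Int) + (-1)) = ((i - 1 : Nat) : Int) := by omega
        have e0 : ((j : Int) + 0) = ((j : Nat) : Int) := by ring
        rw [cim, e0, cell_cast, hc]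
        split_ifs with h1 h2 <;> first | rfl | (exfalso; tauto) | (exfalso; omega)
      · rw [if_neg (by intro hcon; omega), if_neg (by omega)]
    rw [t1, t2, t3, t4]; ring
  · rw [if_neg hc]
    rw [eR, eL, eR, eL,
      if_neg (by tauto), if_neg (by tauto), if_neg (by tauto), if_neg (by tauto)]
    ring

-- B's port as a clean double sum
lemma B_eq (grid : List (List Int)) (p : Int) :
    getEdgeCount_alt grid p = ∑ j ∈ Finset.range grid.length, ∑ i ∈ Finset.range (W grid),
      (eB (gg grid j) p (W grid) i + eB (fun y => gg grid y i) p grid.length j) := by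
  have hw : (if grid.isEmpty then (0 : Int) else ((PySem.List.pyGetD grid 0 []).length : Int))
      = ((W grid : Nat) : Int) := by
    cases grid <;> simp [pyW, W]
  simp only [getEdgeCount_alt, hw]
  rw [foldl_pyRange_add grid.length _
    (fun j => ∑ i ∈ Finset.range (W grid),
      (eB (gg grid j) p (W grid) i + eB (fun y => gg grid y i) p grid.length j)) 0 ?_]
  · rw [zero_add]
  intro acc j hj
  rw [foldl_pyRange_add (W grid) _
    (fun i => eB (gg grid j) p (W grid) i + eB (fun y => gg grid y i) p grid.length j) acc ?_]
  intro acc2 i hi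
  simp only [add_if_one, if_add_zero]
  have cj1 : ((j : Int) + 1) = ((j + 1 : Nat) : Int) := by push_cast; ring
  have ci1 : ((i : Int) + 1) = ((i + 1 : Nat) : Int) := by push_cast; ring
  rw [cj1, ci1, cell_cast, cell_cast, cell_cast, eB, eB]
  simp only [Nat.cast_lt]
  ring

-- ===== VERDICT (by name: the statement is the Claim_ definition above) =====
theorem getEdgeCount_spec : Claim_equal_getEdgeCount := by
  intro grid p _ _
  unfold Spec_getEdgeCount
  rw [A_eq, B_eq, master (gg grid) p grid.length (W grid)]
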